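-- pv_equiv track=rewrite | github.com/sangdev27/-canhcayheoua | index.py | parse_dnd_paths
-- ===== SOURCE A (Python) =====
-- def parse_dnd_paths(data):
--     paths = []
--     data = data.strip()
--     if data.startswith('{'):
--         cur = ''
--         in_brace = False
--         for ch in data:
--             if ch == '{':
--                 in_brace = True
--                 cur = ''
--             elif ch == '}':
--                 in_brace = False
--                 if cur:
--                     paths.append(cur)
--                 cur = ''
--             elif in_brace:
--                 cur += ch
--     else:
--         paths = [p.strip() for p in data.split()]
--     return paths
-- ===== SOURCE B (Python) =====
-- def parse_dnd_paths(data):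
--     data = data.strip()
--     if not data.startswith('{'):
--         return data.split()
--     out = []
--     for seg in data.split('}')[:-1]:
--         i = seg.rfind('{')
--         if i >= 0 and seg[i+1:]:
--             out.append(seg[i+1:])
--     return out
-- ===== Notes on version B (the rewrite author's own statement) =====
-- stated objective: alternative
-- what changed: A's character-by-character finite-state scan (in_brace flag plus a cur accumulator) is replaced by splitting the string on '}' once and, for each segment before the last, taking the non-empty suffix after its last '{' via rfind/slice; the whitespace branch drops the redundant per-word strip.
import Mathlib
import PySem

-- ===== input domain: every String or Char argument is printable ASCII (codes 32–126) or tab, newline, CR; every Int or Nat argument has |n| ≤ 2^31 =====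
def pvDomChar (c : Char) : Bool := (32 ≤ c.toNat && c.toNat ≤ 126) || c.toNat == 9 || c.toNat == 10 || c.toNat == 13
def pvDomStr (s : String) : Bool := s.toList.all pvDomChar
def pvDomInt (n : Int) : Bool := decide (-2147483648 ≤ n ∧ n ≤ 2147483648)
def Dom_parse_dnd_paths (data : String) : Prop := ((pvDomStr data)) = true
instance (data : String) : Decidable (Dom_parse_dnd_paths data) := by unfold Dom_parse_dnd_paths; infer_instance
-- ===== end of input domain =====

-- B replaces A's char-by-char in_brace/cur state machine by splitting on '}' and taking the part after
-- the last '{' of each segment (objective: alternative — a different decomposition of the same scan).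

-- ===== PORT A =====
-- the body of A's for-loop over the characters (paths, cur, in_brace)
def pvStepA (s : List String × List Char × Bool) (ch : Char) : List String × List Char × Bool :=
  if ch = '{' then (s.1, ([], true))
  else if ch = '}' then ((if s.2.1 ≠ [] then s.1 ++ [String.ofList s.2.1] else s.1), ([], false))
  else if s.2.2 then (s.1, (s.2.1 ++ [ch], s.2.2)) else s

def parse_dnd_paths (data : String) : List String :=
  let d := PySem.Str.strip data
  if PySem.Str.startswith d "{" then
    (d.toList.foldl pvStepA ([], ([], false))).1
  else
    (PySem.Str.split₀ d).map (fun p => PySem.Str.strip p)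

-- ===== PORT B =====
-- the body of B's for-loop over the segments of data.split('}')[:-1]
def pvStepB (out : List String) (seg : List Char) : List String :=
  let i := PySem.Chars.rfind seg ['{']
  let tail := PySem.Chars.slice seg (some (i + 1)) none
  if 0 ≤ i ∧ tail ≠ [] then out ++ [String.ofList tail] else out

def parse_dnd_paths_alt (data : String) : List String :=
  let d := PySem.Str.strip data
  if ¬ PySem.Str.startswith d "{" then PySem.Str.split₀ d
  else
    (PySem.List.slice (PySem.Chars.splitOn d.toList ['}']) none (some (-1))).foldl pvStepB []

-- ===== PRECONDITION & SPEC =====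
def Spec_parse_dnd_paths (data : String) (out : List String) : Prop := out = parse_dnd_paths_alt data
instance (data : String) (out : List String) : Decidable (Spec_parse_dnd_paths data out) := by unfold Spec_parse_dnd_paths; infer_instance

-- ===== CLAIM (what is proved, stated in full; the proofs are below) =====
def Claim_equal_parse_dnd_paths : Prop := ∀ (data : String), Dom_parse_dnd_paths data → Spec_parse_dnd_paths data (parse_dnd_paths data)

-- ===== LEMMAS AND PROOFS =====

-- A's loop, as a recursion over the remaining characters (paths accumulator factored out)
def pvFA : List Char → Bool → List Char → List String
  | _, _, [] => []
  | cur, inb, c :: cs =>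
    if c = '{' then pvFA [] true cs
    else if c = '}' then (if cur ≠ [] then [String.ofList cur] else []) ++ pvFA [] false cs
    else if inb then pvFA (cur ++ [c]) inb cs else pvFA cur inb cs

-- splitting on '}' as a clean structural recursion (pre = the pending segment so far)
def pvSplit : List Char → List Char → List (List Char)
  | pre, [] => [pre]
  | pre, c :: cs => if c = '}' then pre :: pvSplit [] cs else pvSplit (pre ++ [c]) cs

-- A's state after reading a close-brace-free prefix
def pvExtStep (st : List Char × Bool) (c : Char) : List Char × Bool :=
  if c = '{' then ([], true) else if c = '}' then ([], false)
  else if st.2 then (st.1 ++ [c], st.2) else st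

def pvExt (pre : List Char) : List Char × Bool := pre.foldl pvExtStep ([], false)

-- B's per-segment contribution
def pvBfun (seg : List Char) : List String :=
  let i := PySem.Chars.rfind seg ['{']
  let tail := PySem.Chars.slice seg (some (i + 1)) none
  if 0 ≤ i ∧ tail ≠ [] then [String.ofList tail] else []

lemma pvFoldA_spec (cs : List Char) : ∀ (paths : List String) (cur : List Char) (inb : Bool),
    (cs.foldl pvStepA (paths, (cur, inb))).1 = paths ++ pvFA cur inb cs := by
  induction cs with
  | nil => intro paths cur inb; simp [pvFA]
  | cons c cs ih =>
    intro paths cur inb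
    simp only [List.foldl_cons, pvFA]
    by_cases h1 : c = '{'
    · simp [pvStepA, h1, ih]
    · by_cases h2 : c = '}'
      · simp only [pvStepA, h2, if_true]
        split_ifs <;> simp_all
      · by_cases h3 : inb <;> simp [pvStepA, h1, h2, h3, ih]

lemma pvSplitOn_go_eq (l : List Char) : ∀ (cur : List Char) (acc : List (List Char)) (fuel : Nat),
    l.length ≤ fuel →
    PySem.Chars.splitOn.go ['}'] fuel l cur acc = acc.reverse ++ pvSplit cur.reverse l := by
  induction l with
  | nil => intro cur acc fuel _; cases fuel <;> simp [PySem.Chars.splitOn.go, pvSplit]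
  | cons c cs ih =>
    intro cur acc fuel hf
    obtain ⟨fuel, rfl⟩ : ∃ f, fuel = f + 1 := ⟨fuel - 1, by simp at hf; omega⟩
    by_cases h : c = '}'
    · subst h
      rw [show PySem.Chars.splitOn.go ['}'] (fuel+1) ('}'::cs) cur acc
            = PySem.Chars.splitOn.go ['}'] fuel cs [] (cur.reverse::acc) by
          simp [PySem.Chars.splitOn.go, List.isPrefixOf]]
      rw [ih [] (cur.reverse::acc) fuel (by simpa using Nat.lt_succ_iff.mp (Nat.lt_of_lt_of_le (Nat.lt_succ_of_le (Nat.le_refl _)) hf))]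
      simp [pvSplit]
    · rw [show PySem.Chars.splitOn.go ['}'] (fuel+1) (c::cs) cur acc
            = PySem.Chars.splitOn.go ['}'] fuel cs (c::cur) acc by
          simp [PySem.Chars.splitOn.go, List.isPrefixOf, Ne.symm h]]
      rw [ih (c::cur) acc fuel (by simp at hf; omega)]
      simp [pvSplit, h]

lemma pvSplitOn_eq (cs : List Char) : PySem.Chars.splitOn cs ['}'] = pvSplit [] cs := by
  rw [PySem.Chars.splitOn, pvSplitOn_go_eq cs [] [] (cs.length+1) (by omega)]
  simp

lemma pvSplit_ne_nil (pre cs : List Char) : pvSplit pre cs ≠ [] := by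
  induction cs generalizing pre with
  | nil => simp [pvSplit]
  | cons c cs ih => simp only [pvSplit]; split_ifs <;> simp [ih]

lemma pvSliceDropLast {α : Type} (xs : List α) :
    PySem.List.slice xs none (some (-1)) = xs.dropLast := by
  cases xs with
  | nil => simp [PySem.List.slice, PySem.List.clampIdx]
  | cons x xs =>
    simp only [PySem.List.slice, PySem.List.clampIdx, List.dropLast_eq_take]
    norm_num
    rw [if_neg (by omega)]
    omega

lemma pvSliceDrop (xs : List Char) (k : Nat) (hk : k ≤ xs.length) :
    PySem.Chars.slice xs (some (k : Int)) none = xs.drop k := by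
  simp only [PySem.Chars.slice, PySem.List.slice, PySem.List.clampIdx]
  rw [if_neg (by omega)]
  simp only [Int.toNat_natCast, min_eq_left hk]
  exact List.take_of_length_le (by simp)

lemma pvRfind_nil : PySem.Chars.rfind [] ['{'] = -1 := by
  simp [PySem.Chars.rfind, PySem.Chars.rfind.go, List.isPrefixOf]

lemma pvRfind_append_brace (a : List Char) :
    PySem.Chars.rfind (a ++ ['{']) ['{'] = (a.length : Int) := by
  rw [PySem.Chars.rfind]
  rw [show (a ++ ['{']).length = a.length + 1 by simp]
  rw [show PySem.Chars.rfind.go (a ++ ['{']) ['{'] (a.length + 1)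
        = PySem.Chars.rfind.go (a ++ ['{']) ['{'] a.length by
      simp [PySem.Chars.rfind.go]]
  cases h : a.length with
  | zero =>
    have : a = [] := List.eq_nil_of_length_eq_zero h
    subst this
    simp [PySem.Chars.rfind.go, List.isPrefixOf]
  | succ m =>
    rw [show PySem.Chars.rfind.go (a ++ ['{']) ['{'] (m+1)
          = if List.isPrefixOf ['{'] ((a ++ ['{']).drop (m+1)) then ((m:Int)+1) else PySem.Chars.rfind.go (a ++ ['{']) ['{'] m by
        simp [PySem.Chars.rfind.go]]
    rw [show (a ++ ['{']).drop (m+1) = ['{'] by rw [← h]; simp]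
    simp [List.isPrefixOf]

lemma pvRfind_go_append_other (a : List Char) (c : Char) (hc : c ≠ '{') :
    ∀ j, j ≤ a.length → PySem.Chars.rfind.go (a ++ [c]) ['{'] j = PySem.Chars.rfind.go a ['{'] j := by
  intro j
  induction j with
  | zero =>
    intro _
    simp only [PySem.Chars.rfind.go]
    cases a with
    | nil => simp [List.isPrefixOf, Ne.symm hc]
    | cons y z => simp [List.isPrefixOf]
  | succ m ih =>
    intro hm
    rw [show PySem.Chars.rfind.go (a ++ [c]) ['{'] (m+1)
          = if List.isPrefixOf ['{'] ((a ++ [c]).drop (m+1)) then ((m:Int)+1) else PySem.Chars.rfind.go (a ++ [c]) ['{'] m by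
        simp [PySem.Chars.rfind.go]]
    rw [show PySem.Chars.rfind.go a ['{'] (m+1)
          = if List.isPrefixOf ['{'] (a.drop (m+1)) then ((m:Int)+1) else PySem.Chars.rfind.go a ['{'] m by
        simp [PySem.Chars.rfind.go]]
    by_cases he : m + 1 = a.length
    · rw [show (a ++ [c]).drop (m+1) = [c] by rw [he]; simp]
      rw [show a.drop (m+1) = [] by rw [he]; simp]
      simp [List.isPrefixOf, Ne.symm hc, ih (by omega)]
    · have hlt : m + 1 < a.length := by omega
      rw [List.drop_append_of_le_length (by omega)]
      cases hd : a.drop (m+1) with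
      | nil => rw [List.drop_eq_nil_iff] at hd; omega
      | cons y z => simp [List.isPrefixOf, ih (by omega)]

lemma pvRfind_append_other (a : List Char) (c : Char) (hc : c ≠ '{') :
    PySem.Chars.rfind (a ++ [c]) ['{'] = PySem.Chars.rfind a ['{'] := by
  rw [PySem.Chars.rfind, PySem.Chars.rfind]
  rw [show (a ++ [c]).length = a.length + 1 by simp]
  rw [show PySem.Chars.rfind.go (a ++ [c]) ['{'] (a.length + 1)
        = PySem.Chars.rfind.go (a ++ [c]) ['{'] a.length by
      simp [PySem.Chars.rfind.go]]
  exact pvRfind_go_append_other a c hc a.length (le_refl _)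

lemma pvExt_append (pre : List Char) (c : Char) :
    pvExt (pre ++ [c]) = pvExtStep (pvExt pre) c := by
  simp [pvExt, List.foldl_append]

lemma pvQQ (a : List Char) (ha : '}' ∉ a) :
    (pvExt a = ([], false) ∧ PySem.Chars.rfind a ['{'] = -1) ∨
    (∃ t, pvExt a = (t, true) ∧ 0 ≤ PySem.Chars.rfind a ['{'] ∧
      PySem.Chars.rfind a ['{'] < a.length ∧
      PySem.Chars.slice a (some (PySem.Chars.rfind a ['{'] + 1)) none = t) := by
  induction a using List.reverseRecOn with
  | nil => left; exact ⟨rfl, pvRfind_nil⟩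
  | append_singleton a c ih =>
    have ha' : '}' ∉ a := fun h => ha (List.mem_append_left _ h)
    have hc : c ≠ '}' := fun h => ha (by simp [h])
    by_cases hbr : c = '{'
    · subst hbr
      right
      refine ⟨[], ?_, ?_, ?_, ?_⟩
      · rw [pvExt_append]; simp [pvExtStep]
      · rw [pvRfind_append_brace]; positivity
      · rw [pvRfind_append_brace]; simp
      · rw [pvRfind_append_brace]
        rw [show (a.length : Int) + 1 = ((a.length + 1 : Nat) : Int) by push_cast; ring]
        rw [pvSliceDrop _ _ (by simp)]
        simp
    · rw [pvExt_append, pvRfind_append_other a c hbr]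
      rcases ih ha' with ⟨h1, h2⟩ | ⟨t, h1, h2, h3, h4⟩
      · left
        constructor
        · rw [h1]; simp [pvExtStep, hbr, hc]
        · exact h2
      · right
        refine ⟨t ++ [c], ?_, h2, ?_, ?_⟩
        · rw [h1]; simp [pvExtStep, hbr, hc]
        · simp; omega
        · obtain ⟨k, hk⟩ : ∃ k : Nat, PySem.Chars.rfind a ['{'] = (k : Int) := ⟨(PySem.Chars.rfind a ['{']).toNat, by omega⟩
          rw [hk] at h3 h4 ⊢
          rw [show (k : Int) + 1 = ((k + 1 : Nat) : Int) by push_cast; ring] at h4 ⊢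
          rw [pvSliceDrop _ _ (by simp; omega)] at h4 ⊢
          rw [List.drop_append_of_le_length (by simp at h3; omega), h4]

lemma pvBfun_eq_emit (a : List Char) (ha : '}' ∉ a) :
    pvBfun a = (if (pvExt a).1 ≠ [] then [String.ofList (pvExt a).1] else []) := by
  rcases pvQQ a ha with ⟨h1, h2⟩ | ⟨t, h1, h2, h3, h4⟩
  · simp [pvBfun, h1, h2]
  · simp only [pvBfun, h1, h4]
    by_cases ht : t = [] <;> simp [ht, h2]

lemma pvMain (cs : List Char) : ∀ (pre : List Char), '}' ∉ pre →
    pvFA (pvExt pre).1 (pvExt pre).2 cs = ((pvSplit pre cs).dropLast).flatMap pvBfun := by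
  induction cs with
  | nil => intro pre _; simp [pvFA, pvSplit]
  | cons c cs ih =>
    intro pre hpre
    by_cases h2 : c = '}'
    · subst h2
      rw [show pvFA (pvExt pre).1 (pvExt pre).2 ('}' :: cs)
            = (if (pvExt pre).1 ≠ [] then [String.ofList (pvExt pre).1] else []) ++ pvFA [] false cs by
          simp [pvFA]]
      rw [show pvSplit pre ('}' :: cs) = pre :: pvSplit [] cs by simp [pvSplit]]
      rw [List.dropLast_cons_of_ne_nil (pvSplit_ne_nil [] cs), List.flatMap_cons]
      rw [← pvBfun_eq_emit pre hpre]
      have := ih [] (by simp)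
      simp only [pvExt, List.foldl_nil] at this
      rw [this]
    · rw [show pvSplit pre (c :: cs) = pvSplit (pre ++ [c]) cs by simp [pvSplit, h2]]
      have hpre' : '}' ∉ pre ++ [c] := by
        simp [List.mem_append]; exact ⟨fun h => hpre h, fun h => h2 h.symm⟩
      rw [← ih (pre ++ [c]) hpre', pvExt_append]
      by_cases h1 : c = '{'
      · simp [pvFA, h1, pvExtStep]
      · cases hb : (pvExt pre).2 <;> simp [pvFA, h1, h2, pvExtStep, hb]

lemma pvFoldB_eq (segs : List (List Char)) : ∀ (acc : List String),
    segs.foldl pvStepB acc = acc ++ segs.flatMap pvBfun := by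
  induction segs with
  | nil => intro acc; simp
  | cons s segs ih =>
    intro acc
    rw [List.foldl_cons, ih, List.flatMap_cons]
    have : pvStepB acc s = acc ++ pvBfun s := by
      simp only [pvStepB, pvBfun]
      split_ifs <;> simp
    rw [this, List.append_assoc]

lemma pvSplit₀go_nospace (l : List Char) : ∀ (cur : List Char) (acc : List (List Char)),
    (∀ w ∈ acc, ∀ c ∈ w, PySem.Chars.isspace c = false) →
    (∀ ch ∈ cur, PySem.Chars.isspace ch = false) →
    ∀ w ∈ PySem.Chars.split₀.go l cur acc, ∀ c ∈ w, PySem.Chars.isspace c = false := by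
  induction l with
  | nil =>
    intro cur acc hacc hcur
    simp only [PySem.Chars.split₀.go]
    split_ifs
    · simpa using hacc
    · intro w hw
      simp at hw
      rcases hw with hw | hw
      · exact fun c hc => hacc w hw c hc
      · subst hw; intro c hc; exact hcur c (by simpa using hc)
  | cons c rest ih =>
    intro cur acc hacc hcur
    by_cases hs : PySem.Chars.isspace c = true
    · by_cases hce : cur.isEmpty
      · rw [show PySem.Chars.split₀.go (c :: rest) cur acc = PySem.Chars.split₀.go rest [] acc by
            simp [PySem.Chars.split₀.go, hs, hce]]
        exact ih [] acc hacc (by simp)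
      · rw [show PySem.Chars.split₀.go (c :: rest) cur acc
              = PySem.Chars.split₀.go rest [] (cur.reverse :: acc) by
            simp [PySem.Chars.split₀.go, hs, hce]]
        refine ih [] (cur.reverse :: acc) ?_ (by simp)
        intro w hw
        rcases List.mem_cons.mp hw with hw | hw
        · subst hw; intro ch hch; exact hcur ch (by simpa using hch)
        · exact hacc w hw
    · rw [show PySem.Chars.split₀.go (c :: rest) cur acc
            = PySem.Chars.split₀.go rest (c :: cur) acc by
          simp [PySem.Chars.split₀.go, hs]]
      refine ih (c :: cur) acc hacc ?_
      intro ch hch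
      rcases List.mem_cons.mp hch with h | h
      · subst h; simpa using hs
      · exact hcur ch h

lemma pvSplit₀_nospace (cs : List Char) :
    ∀ w ∈ PySem.Chars.split₀ cs, ∀ c ∈ w, PySem.Chars.isspace c = false := by
  rw [PySem.Chars.split₀]
  exact pvSplit₀go_nospace cs [] [] (by simp) (by simp)

lemma pvStrip_of_nospace (w : List Char) (h : ∀ c ∈ w, PySem.Chars.isspace c = false) :
    PySem.Chars.strip w = w := by
  have l1 : ∀ v : List Char, (∀ c ∈ v, PySem.Chars.isspace c = false) →
      List.dropWhile PySem.Chars.isspace v = v := by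
    intro v hv
    cases v with
    | nil => simp
    | cons x t => rw [List.dropWhile_cons, hv x (by simp)]; simp
  rw [PySem.Chars.strip, PySem.Chars.lstrip, PySem.Chars.rstrip, l1 w h]
  rw [l1 w.reverse (fun c hc => h c (List.mem_reverse.mp hc)), List.reverse_reverse]

-- ===== VERDICT (by name: the statement is the Claim_ definition above) =====
theorem parse_dnd_paths_spec : Claim_equal_parse_dnd_paths := by
  intro data _
  unfold Spec_parse_dnd_paths parse_dnd_paths parse_dnd_paths_alt
  by_cases h : PySem.Str.startswith (PySem.Str.strip data) "{" = true
  · simp only [h, if_true, not_true_eq_false, if_false]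
    rw [pvFoldA_spec, pvSplitOn_eq, pvSliceDropLast, pvFoldB_eq]
    simpa [pvExt] using pvMain (PySem.Str.strip data).toList [] (by simp)
  · simp only [h, Bool.not_eq_true, if_true]
    have hmem : ∀ p ∈ PySem.Str.split₀ (PySem.Str.strip data), PySem.Str.strip p = p := by
      intro p hp
      rw [PySem.Str.split₀] at hp
      obtain ⟨w, hw, rfl⟩ := List.mem_map.mp hp
      rw [PySem.Str.strip, String.toList_ofList,
        pvStrip_of_nospace w (pvSplit₀_nospace _ w hw)]
    rw [List.map_congr_left hmem]
    simp
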